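-- pv_equiv track=rewrite | github.com/ramniwas-patidar/sentry-automation-Vo | pipeline/issue_fetcher.py | _deduplicate_issues
-- ===== SOURCE A (Python) =====
-- def _deduplicate_issues(issues: list[dict]) -> list[dict]:
--     """Remove duplicate issues with the same title, keeping the one with highest count."""
--     seen = {}
--     for issue in issues:
--         title = issue.get("title", "")
--         count = int(issue.get("count", 0) or 0)
--         if title not in seen or count > int(seen[title].get("count", 0) or 0):
--             seen[title] = issue
--     return list(seen.values())
-- ===== SOURCE B (Python) =====
-- def _deduplicate_issues(issues: list[dict]) -> list[dict]:
--     """Remove duplicate issues with the same title, keeping the one with highest count."""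
--     groups = {}
--     for issue in issues:
--         groups.setdefault(issue.get("title", ""), []).append(issue)
--     return [max(group, key=lambda i: int(i.get("count", 0) or 0))
--             for group in groups.values()]
-- ===== Notes on version B (the rewrite author's own statement) =====
-- stated objective: simpler
-- what changed: A keeps a running-best dict with a strict-greater compare per element; B first groups issues by title into lists (one pass, insertion order) and then reduces each group with max(key=count), whose first-maximum tie-break reproduces A's strict '>' choice.
import Mathlib
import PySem

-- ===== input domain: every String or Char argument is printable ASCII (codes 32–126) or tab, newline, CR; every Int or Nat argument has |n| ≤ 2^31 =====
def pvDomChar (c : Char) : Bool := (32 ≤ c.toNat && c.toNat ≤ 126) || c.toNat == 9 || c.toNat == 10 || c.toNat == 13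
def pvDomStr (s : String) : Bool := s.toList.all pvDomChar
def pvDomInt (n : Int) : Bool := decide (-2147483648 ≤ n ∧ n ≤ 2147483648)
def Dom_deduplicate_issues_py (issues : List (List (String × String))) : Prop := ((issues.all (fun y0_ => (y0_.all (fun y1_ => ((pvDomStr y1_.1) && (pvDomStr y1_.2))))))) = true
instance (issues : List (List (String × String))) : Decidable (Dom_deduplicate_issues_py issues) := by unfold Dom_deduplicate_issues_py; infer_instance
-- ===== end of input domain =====

-- B replaces A's single-pass running-best dict (strict-greater replace) by a two-phase
-- group-by-title then reduce-each-group-with-max decomposition; objective: simpler.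

-- ===== PORT A =====
-- int(issue.get("count", 0) or 0); the `none` arm of ofStr? (Python ValueError) is excluded by Pre_,
-- so the `.getD 0` default is never reached on admitted inputs.
def pvCount (issue : List (String × String)) : Int :=
  match PySem.Dict.get? (PySem.Dict.mk issue) "count" with
  | none => 0
  | some s => if s = "" then 0 else (PySem.Int.ofStr? s).getD 0

-- issue.get("title", "")
def pvTitle (issue : List (String × String)) : String :=
  PySem.Dict.getD (PySem.Dict.mk issue) "title" ""

-- loop body of A: if title not in seen or count > int(seen[title].get("count",0) or 0): seen[title] = issue
def pvStepA (seen : PySem.Dict String (List (String × String))) (issue : List (String × String)) :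
    PySem.Dict String (List (String × String)) :=
  match PySem.Dict.get? seen (pvTitle issue) with
  | none => seen.insert (pvTitle issue) issue
  | some prev => if pvCount issue > pvCount prev then seen.insert (pvTitle issue) issue else seen

def deduplicate_issues_py (issues : List (List (String × String))) : List (List (String × String)) :=
  (issues.foldl pvStepA PySem.Dict.empty).values

-- ===== PORT B =====
-- loop body of B: groups.setdefault(issue.get("title", ""), []).append(issue)
def pvStepB (groups : PySem.Dict String (List (List (String × String)))) (issue : List (String × String)) :
    PySem.Dict String (List (List (String × String))) :=
  groups.modify (pvTitle issue) [] (fun grp => grp ++ [issue])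

def deduplicate_issues_py_alt (issues : List (List (String × String))) : List (List (String × String)) :=
  let groups := issues.foldl pvStepB PySem.Dict.empty
  -- max(group, key=...): every stored group is nonempty, so max? is never none; .getD [] is unreachable
  groups.values.map (fun group => (PySem.List.max? group pvCount).getD [])

-- ===== PRECONDITION & SPEC =====
-- Pre_ excludes exactly the inputs on which Python A raises ValueError: an issue whose "count"
-- value is a nonempty string that int() cannot parse.
def Pre_deduplicate_issues_py (issues : List (List (String × String))) : Prop :=
  ∀ issue ∈ issues,
    ((PySem.Dict.get? (PySem.Dict.mk issue) "count").all
      (fun s => decide (s = "") || (PySem.Int.ofStr? s).isSome)) = true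
instance (issues : List (List (String × String))) : Decidable (Pre_deduplicate_issues_py issues) := by
  unfold Pre_deduplicate_issues_py; infer_instance

def pvWitness_deduplicate_issues_py : (List (List (String × String))) :=
  [[("title", "a"), ("count", "2")], [("title", "a"), ("count", "1")], [("title", "b")]]

def Spec_deduplicate_issues_py (issues : List (List (String × String))) (out : List (List (String × String))) : Prop := out = deduplicate_issues_py_alt issues
instance (issues : List (List (String × String))) (out : List (List (String × String))) : Decidable (Spec_deduplicate_issues_py issues out) := by unfold Spec_deduplicate_issues_py; infer_instance

-- ===== CLAIM (what is proved, stated in full; the proofs are below) =====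
def Claim_equal_deduplicate_issues_py : Prop := ∀ (issues : List (List (String × String))), Dom_deduplicate_issues_py issues → Pre_deduplicate_issues_py issues → Spec_deduplicate_issues_py issues (deduplicate_issues_py issues)

-- ===== LEMMAS AND PROOFS =====

-- reduce a group the way B does
def pvRed (g : List (List (String × String))) : List (String × String) :=
  (PySem.List.max? g pvCount).getD []

-- the per-entry view of the invariant: an A-entry is the reduction of the B-entry
def pvF (p : String × List (List (String × String))) : String × List (String × String) :=
  (p.1, pvRed p.2)

lemma pvRed_singleton (x : List (String × String)) : pvRed [x] = x := by
  simp [pvRed, PySem.List.max?]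

lemma pvRed_append (g : List (List (String × String))) (x m : List (String × String))
    (hm : PySem.List.max? g pvCount = some m) :
    pvRed (g ++ [x]) = if pvCount m < pvCount x then x else m := by
  unfold PySem.List.max? at hm
  unfold pvRed PySem.List.max?
  rw [List.foldl_append, hm]
  simp only [List.foldl_cons, List.foldl_nil]
  split <;> rfl

lemma get?_rel (seen : PySem.Dict String (List (String × String)))
    (groups : PySem.Dict String (List (List (String × String))))
    (h : seen.items = groups.items.map pvF) (t : String) :
    PySem.Dict.get? seen t = (PySem.Dict.get? groups t).map pvRed := by
  simp only [PySem.Dict.get?, h, List.find?_map]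
  have hp : ((fun p : String × List (String × String) => p.1 == t) ∘ pvF)
      = (fun p : String × List (List (String × String)) => p.1 == t) := by
    funext p; rfl
  rw [hp]
  cases List.find? (fun p => p.1 == t) groups.items <;> rfl

lemma step_rel (seen : PySem.Dict String (List (String × String)))
    (groups : PySem.Dict String (List (List (String × String))))
    (x : List (String × String))
    (h : seen.items = groups.items.map pvF)
    (hne : ∀ p ∈ groups.items, p.2 ≠ [])
    (hnd : groups.keys.Nodup) :
    (pvStepA seen x).items = (pvStepB groups x).items.map pvF
    ∧ (∀ p ∈ (pvStepB groups x).items, p.2 ≠ [])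
    ∧ (pvStepB groups x).keys.Nodup := by
  have hget := get?_rel seen groups h (pvTitle x)
  cases hg : PySem.Dict.get? groups (pvTitle x) with
  | none =>
    have hA : PySem.Dict.get? seen (pvTitle x) = none := by rw [hget, hg]; rfl
    have hcB : groups.contains (pvTitle x) = false := by
      rw [PySem.Dict.contains_eq_isSome_get?, hg]; rfl
    have hcA : seen.contains (pvTitle x) = false := by
      rw [PySem.Dict.contains_eq_isSome_get?, hA]; rfl
    have hB : pvStepB groups x = groups.insert (pvTitle x) [x] := by
      simp [pvStepB, PySem.Dict.modify, PySem.Dict.getD, hg]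
    refine ⟨?_, ?_, ?_⟩
    · rw [hB]
      simp only [pvStepA, hA]
      rw [PySem.Dict.items_insert_of_not_contains seen x hcA,
          PySem.Dict.items_insert_of_not_contains groups [x] hcB]
      simp [h, pvF, pvRed_singleton]
    · rw [hB, PySem.Dict.items_insert_of_not_contains groups [x] hcB]
      intro p hp
      rcases List.mem_append.1 hp with hp | hp
      · exact hne p hp
      · simp only [List.mem_singleton] at hp; subst hp; simp
    · rw [hB]; exact PySem.Dict.nodup_keys_insert groups _ _ hnd
  | some g =>
    have hgmem : g ∈ groups.values := by
      simp only [PySem.Dict.get?] at hg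
      cases hfind : groups.items.find? (fun p => p.1 == pvTitle x) with
      | none => rw [hfind] at hg; simp at hg
      | some p =>
        rw [hfind] at hg
        simp only [Option.map_some, Option.some.injEq] at hg
        have hmem := List.mem_of_find?_eq_some hfind
        rw [← hg]
        exact List.mem_map_of_mem hmem
    have hgne : g ≠ [] := by
      rcases List.mem_map.1 hgmem with ⟨p, hp, hpe⟩
      rw [← hpe]; exact hne p hp
    obtain ⟨m, hm⟩ : ∃ m, PySem.List.max? g pvCount = some m := by
      cases hmm : PySem.List.max? g pvCount with
      | none => exact absurd ((PySem.List.max?_eq_none_iff g pvCount).1 hmm) hgne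
      | some m => exact ⟨m, rfl⟩
    have hredg : pvRed g = m := by simp [pvRed, hm]
    have hA : PySem.Dict.get? seen (pvTitle x) = some m := by
      rw [hget, hg, Option.map_some, hredg]
    have hcB : groups.contains (pvTitle x) = true := by
      rw [PySem.Dict.contains_eq_isSome_get?, hg]; rfl
    have hcA : seen.contains (pvTitle x) = true := by
      rw [PySem.Dict.contains_eq_isSome_get?, hA]; rfl
    have hB : pvStepB groups x = groups.insert (pvTitle x) (g ++ [x]) := by
      simp [pvStepB, PySem.Dict.modify, PySem.Dict.getD, hg]
    have hBitems : (pvStepB groups x).items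
        = groups.items.map (fun p => if p.1 == pvTitle x then (pvTitle x, g ++ [x]) else p) := by
      rw [hB]; exact PySem.Dict.items_insert_of_contains groups (g ++ [x]) hcB
    have hredgx := pvRed_append g x m hm
    refine ⟨?_, ?_, ?_⟩
    · simp only [pvStepA, hA]
      by_cases hlt : pvCount x > pvCount m
      · rw [if_pos hlt]
        rw [PySem.Dict.items_insert_of_contains seen x hcA, hBitems, h,
            List.map_map, List.map_map]
        apply List.map_congr_left
        intro p _
        by_cases hpt : p.1 == pvTitle x
        · simp only [Function.comp_apply, pvF, hpt, if_true, hredgx]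
          rw [if_pos (show pvCount m < pvCount x by omega)]
        · simp only [Function.comp_apply, pvF, hpt, Bool.false_eq_true, if_false]
      · rw [if_neg hlt]
        rw [hBitems, h, List.map_map]
        apply List.map_congr_left
        intro p hp
        by_cases hpt : p.1 == pvTitle x
        · have hpt' : p.1 = pvTitle x := by exact beq_iff_eq.1 hpt
          have hpg : p.2 = g := by
            have hmem : (p.1, p.2) ∈ groups.items := by simpa using hp
            have := PySem.Dict.get?_of_mem_items groups hmem hnd
            rw [hpt', hg] at this
            exact (Option.some.inj this).symm
          simp only [Function.comp_apply, pvF, hpt, if_true, hredgx]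
          rw [if_neg (show ¬ pvCount m < pvCount x by omega), ← hredg, hpg, hpt']
        · simp only [Function.comp_apply, pvF, hpt, Bool.false_eq_true, if_false]
    · rw [hBitems]
      intro p hp
      rcases List.mem_map.1 hp with ⟨q, hq, hqe⟩
      by_cases hqt : q.1 == pvTitle x
      · rw [← hqe]; simp [hqt]
      · rw [← hqe]; simp only [hqt, if_neg, Bool.false_eq_true, not_false_iff, if_neg]
        exact hne q hq
    · rw [hB]; exact PySem.Dict.nodup_keys_insert groups _ _ hnd

lemma loop_rel (issues : List (List (String × String)))
    (seen : PySem.Dict String (List (String × String)))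
    (groups : PySem.Dict String (List (List (String × String))))
    (h : seen.items = groups.items.map pvF)
    (hne : ∀ p ∈ groups.items, p.2 ≠ [])
    (hnd : groups.keys.Nodup) :
    (issues.foldl pvStepA seen).items = (issues.foldl pvStepB groups).items.map pvF := by
  induction issues generalizing seen groups with
  | nil => simpa using h
  | cons x rest ih =>
    obtain ⟨h', hne', hnd'⟩ := step_rel seen groups x h hne hnd
    simpa using ih (pvStepA seen x) (pvStepB groups x) h' hne' hnd'

-- ===== VERDICT (by name: the statement is the Claim_ definition above) =====
theorem deduplicate_issues_py_spec : Claim_equal_deduplicate_issues_py := by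
  intro issues _ _
  unfold Spec_deduplicate_issues_py deduplicate_issues_py deduplicate_issues_py_alt
  have h := loop_rel issues PySem.Dict.empty PySem.Dict.empty rfl (by intro p hp; cases hp) PySem.Dict.nodup_keys_empty
  simp only [PySem.Dict.values, h, List.map_map]
  rfl
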